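-- pv_equiv track=rewrite | github.com/wtg/shubble | ml/pipelines.py | apply_pipeline_hierarchy
-- ===== SOURCE A (Python) =====
-- PIPELINE_HIERARCHY = [
--     'load',
--     'preprocess',
--     'segment',
--     'stops',
--     'eta',
--     'split',
--     'train',
--     'fit'
-- ]
--
-- def apply_pipeline_hierarchy(kwargs: dict) -> dict:
--     """
--     Apply pipeline hierarchy to kwargs.
--
--     If a pipeline stage flag is set to True, all subsequent stages in the
--     hierarchy are also set to True.
--
--     Pipeline hierarchy order: load -> preprocess -> segment -> stops -> eta -> split -> train -> fit
--
--     Args: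
--         kwargs: Dictionary of keyword arguments
--
--     Returns:
--         Modified kwargs with hierarchy applied
--
--     Examples:
--         >>> apply_pipeline_hierarchy({'segment': True})
--         {'segment': True, 'stops': True, 'eta': True, 'split': True, 'train': True, 'fit': True}
--
--         >>> apply_pipeline_hierarchy({'load': True})
--         {'load': True, 'preprocess': True, 'segment': True, 'stops': True, 'eta': True, 'split': True, 'train': True, 'fit': True}
--     """
--     kwargs = kwargs.copy()
--
--     # Find the earliest stage that is set to True
--     trigger_index = None
--     for i, stage in enumerate(PIPELINE_HIERARCHY):
--         if kwargs.get(stage, False):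
--             if trigger_index is None:
--                 trigger_index = i
--             break
--
--     # If a stage was triggered, set all subsequent stages to True
--     if trigger_index is not None:
--         for stage in PIPELINE_HIERARCHY[trigger_index:]:
--             kwargs[stage] = True
--
--     return kwargs
-- ===== SOURCE B (Python) =====
-- PIPELINE_HIERARCHY = [
--     'load',
--     'preprocess',
--     'segment',
--     'stops',
--     'eta',
--     'split',
--     'train',
--     'fit'
-- ]
--
-- def apply_pipeline_hierarchy(kwargs: dict) -> dict:
--     """Single forward pass: once a stage flag is truthy, it and every later
--     stage are set to True."""
--     kwargs = kwargs.copy()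
--     triggered = False
--     for stage in PIPELINE_HIERARCHY:
--         if triggered or kwargs.get(stage, False):
--             kwargs[stage] = True
--             triggered = True
--     return kwargs
-- ===== Notes on version B (the rewrite author's own statement) =====
-- stated objective: simpler
-- what changed: Replaced A's two-phase structure (find the first truthy stage's index, then fill the tail slice of the hierarchy) with a single forward pass over PIPELINE_HIERARCHY carrying a running 'triggered' boolean.
import Mathlib
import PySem

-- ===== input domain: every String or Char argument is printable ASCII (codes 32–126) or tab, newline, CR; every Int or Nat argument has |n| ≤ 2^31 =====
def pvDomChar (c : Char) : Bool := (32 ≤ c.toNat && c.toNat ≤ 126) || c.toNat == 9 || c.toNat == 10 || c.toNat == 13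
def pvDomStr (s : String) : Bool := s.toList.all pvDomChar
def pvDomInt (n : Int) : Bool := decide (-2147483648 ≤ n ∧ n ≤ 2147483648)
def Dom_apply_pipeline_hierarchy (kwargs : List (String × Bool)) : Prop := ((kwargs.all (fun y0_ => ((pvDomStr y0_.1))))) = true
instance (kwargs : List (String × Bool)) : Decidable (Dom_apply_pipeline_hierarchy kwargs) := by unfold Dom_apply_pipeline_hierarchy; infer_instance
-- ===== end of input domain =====

-- B replaces A's find-trigger-index-then-fill-tail-slice two-phase loop by a single
-- forward pass carrying a running `triggered` flag (objective: simpler).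

-- module constant PIPELINE_HIERARCHY (shared by both Pythons)
def pvHierarchy : List String := ["load", "preprocess", "segment", "stops", "eta", "split", "train", "fit"]

-- ===== PORT A =====
-- A's first loop: enumerate(PIPELINE_HIERARCHY), break at the first stage whose flag is truthy
def pvFindTrigger (d : PySem.Dict String Bool) : List (Int × String) → Option Int
  | [] => none
  | (i, stage) :: rest => if d.getD stage false then some i else pvFindTrigger d rest

def apply_pipeline_hierarchy (kwargs : List (String × Bool)) : List (String × Bool) :=
  let d := PySem.Dict.mk kwargs  -- kwargs.copy()
  match pvFindTrigger d (PySem.List.enumerate pvHierarchy) with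
  | none => d.items
  | some i =>
      -- for stage in PIPELINE_HIERARCHY[trigger_index:]: kwargs[stage] = True
      ((PySem.List.slice pvHierarchy (some i) none).foldl
        (fun d stage => d.insert stage true) d).items

-- ===== PORT B =====
def apply_pipeline_hierarchy_alt (kwargs : List (String × Bool)) : List (String × Bool) :=
  (pvHierarchy.foldl
    (fun (st : PySem.Dict String Bool × Bool) stage =>
      if st.2 || st.1.getD stage false then (st.1.insert stage true, true) else st)
    (PySem.Dict.mk kwargs, false)).1.items

-- ===== PRECONDITION & SPEC =====
def Spec_apply_pipeline_hierarchy (kwargs : List (String × Bool)) (out : List (String × Bool)) : Prop := out = apply_pipeline_hierarchy_alt kwargs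
instance (kwargs : List (String × Bool)) (out : List (String × Bool)) : Decidable (Spec_apply_pipeline_hierarchy kwargs out) := by unfold Spec_apply_pipeline_hierarchy; infer_instance

-- ===== CLAIM (what is proved, stated in full; the proofs are below) =====
def Claim_equal_apply_pipeline_hierarchy : Prop := ∀ (kwargs : List (String × Bool)), Dom_apply_pipeline_hierarchy kwargs → Spec_apply_pipeline_hierarchy kwargs (apply_pipeline_hierarchy kwargs)

-- ===== LEMMAS AND PROOFS =====

-- ===== VERDICT (by name: the statement is the Claim_ definition above) =====
set_option maxHeartbeats 1000000 in
theorem apply_pipeline_hierarchy_spec : Claim_equal_apply_pipeline_hierarchy := by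
  intro kwargs _
  unfold Spec_apply_pipeline_hierarchy apply_pipeline_hierarchy apply_pipeline_hierarchy_alt
  set d := PySem.Dict.mk kwargs with hd
  by_cases h1 : d.getD "load" false
  · simp [pvHierarchy, pvFindTrigger, PySem.List.enumerate, PySem.List.slice, h1]
  by_cases h2 : d.getD "preprocess" false
  · simp [pvHierarchy, pvFindTrigger, PySem.List.enumerate, PySem.List.slice, h1, h2]
  by_cases h3 : d.getD "segment" false
  · simp [pvHierarchy, pvFindTrigger, PySem.List.enumerate, PySem.List.slice, h1, h2, h3]
  by_cases h4 : d.getD "stops" false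
  · simp [pvHierarchy, pvFindTrigger, PySem.List.enumerate, PySem.List.slice, h1, h2, h3, h4]
  by_cases h5 : d.getD "eta" false
  · simp [pvHierarchy, pvFindTrigger, PySem.List.enumerate, PySem.List.slice, h1, h2, h3, h4, h5]
  by_cases h6 : d.getD "split" false
  · simp [pvHierarchy, pvFindTrigger, PySem.List.enumerate, PySem.List.slice, h1, h2, h3, h4, h5, h6]
  by_cases h7 : d.getD "train" false
  · simp [pvHierarchy, pvFindTrigger, PySem.List.enumerate, PySem.List.slice, h1, h2, h3, h4, h5, h6, h7]
  by_cases h8 : d.getD "fit" false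
  · simp [pvHierarchy, pvFindTrigger, PySem.List.enumerate, PySem.List.slice, h1, h2, h3, h4, h5, h6, h7, h8]
  simp [pvHierarchy, pvFindTrigger, PySem.List.enumerate, h1, h2, h3, h4, h5, h6, h7, h8]
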